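-- pv_equiv track=rewrite | github.com/andrevdm/dht_sensor | lcdPico1.8/code_ref.py | eu_dst
-- ===== SOURCE A (Python) =====
-- def eu_dst(year, month, day, hour):
--     """EU DST: last Sunday March 01:00 UTC -> last Sunday Oct 01:00 UTC."""
--
--     def weekday(y, m, d):  # 0=Sunday
--         t = [0, 3, 2, 5, 0, 3, 5, 1, 4, 6, 2, 4]
--         if m < 3:
--             y -= 1
--         return (y + y // 4 - y // 100 + y // 400 + t[m - 1] + d) % 7
--
--     def last_sunday(y, m):
--         for d in range(31, 24, -1):
--             if weekday(y, m, d) == 0: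
--                 return d
--         return 31
--
--     if month < 3 or month > 10:
--         return False
--     if 3 < month < 10:
--         return True
--     if month == 3:
--         last = last_sunday(year, 3)
--         return day > last or (day == last and hour >= 1)
--     last = last_sunday(year, 10)
--     return day < last or (day == last and hour < 1)
-- ===== SOURCE B (Python) =====
-- def eu_dst(year, month, day, hour):
--     """EU DST as one lexicographic interval test: DST holds exactly when
--     (3, lastSunMarch, 1) <= (month, day, hour) < (10, lastSunOct, 1).
--     The last Sundays come from the shared year term c: day 31 of March has
--     weekday (c+2+31)%7 and of October (c+6+31)%7 (Sakamoto, 0=Sunday), so no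
--     table, no per-day search and no month branching is needed."""
--     c = (year + year // 4 - year // 100 + year // 400) % 7
--     start = 31 - (c + 33) % 7  # last Sunday of March
--     end = 31 - (c + 37) % 7    # last Sunday of October
--     return (3, start, 1) <= (month, day, hour) < (10, end, 1)
-- ===== Notes on version B (the rewrite author's own statement) =====
-- stated objective: alternative
-- what changed: Replaces the month-branch chain with weekday table and descending day-search by one shared year term c, closed-form last Sundays 31-(c+33)%7 and 31-(c+37)%7, and a single lexicographic interval test (3,start,1) <= (month,day,hour) < (10,end,1).
import Mathlib
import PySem

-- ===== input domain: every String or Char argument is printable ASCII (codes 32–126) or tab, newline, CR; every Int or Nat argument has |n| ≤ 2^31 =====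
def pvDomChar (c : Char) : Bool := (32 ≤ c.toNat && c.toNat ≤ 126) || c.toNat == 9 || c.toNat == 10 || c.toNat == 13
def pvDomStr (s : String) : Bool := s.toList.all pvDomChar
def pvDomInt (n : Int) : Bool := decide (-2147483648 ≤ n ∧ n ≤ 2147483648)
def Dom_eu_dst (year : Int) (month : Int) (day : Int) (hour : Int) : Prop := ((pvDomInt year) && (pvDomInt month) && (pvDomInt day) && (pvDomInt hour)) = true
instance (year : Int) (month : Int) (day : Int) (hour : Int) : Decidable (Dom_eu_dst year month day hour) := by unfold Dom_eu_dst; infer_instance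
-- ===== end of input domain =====

-- B replaces A's branch chain, weekday table and day-scanning search by a shared
-- year term, closed-form last Sundays and one lexicographic interval test
-- (objective: alternative).


-- ===== PORT A =====
-- Python's t[m-1] is ported with pyGetD; the index is always in range because
-- weekday is only called with m = 3 or m = 10.
def pvWeekdayA (y : Int) (m : Int) (d : Int) : Int :=
  let t : List Int := [0, 3, 2, 5, 0, 3, 5, 1, 4, 6, 2, 4]
  let y := if m < 3 then y - 1 else y
  PySem.Int.mod (y + PySem.Int.floordiv y 4 - PySem.Int.floordiv y 100
    + PySem.Int.floordiv y 400 + PySem.List.pyGetD t (m - 1) 0 + d) 7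

def pvLastSundayA (y : Int) (m : Int) : Int :=
  match (PySem.List.pyRange 31 24 (-1)).find? (fun d => pvWeekdayA y m d == 0) with
  | some d => d
  | none => 31

def eu_dst (year : Int) (month : Int) (day : Int) (hour : Int) : Bool :=
  if month < 3 || month > 10 then false
  else if 3 < month && month < 10 then true
  else if month == 3 then
    let last := pvLastSundayA year 3
    day > last || (day == last && hour >= 1)
  else
    let last := pvLastSundayA year 10
    day < last || (day == last && hour < 1)

-- ===== PORT B =====
-- Python's chained tuple comparison (3, start, 1) <= (m, d, h) < (10, end, 1)
-- is ported as its exact lexicographic meaning on Int triples.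
def eu_dst_alt (year : Int) (month : Int) (day : Int) (hour : Int) : Bool :=
  let c := PySem.Int.mod (year + PySem.Int.floordiv year 4
    - PySem.Int.floordiv year 100 + PySem.Int.floordiv year 400) 7
  let start := 31 - PySem.Int.mod (c + 33) 7
  let stop := 31 - PySem.Int.mod (c + 37) 7
  (3 < month || (month == 3 && (start < day || (start == day && 1 ≤ hour))))
  && (month < 10 || (month == 10 && (day < stop || (day == stop && hour < 1))))

-- ===== PRECONDITION & SPEC =====
def Spec_eu_dst (year : Int) (month : Int) (day : Int) (hour : Int) (out : Bool) : Prop := out = eu_dst_alt year month day hour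
instance (year : Int) (month : Int) (day : Int) (hour : Int) (out : Bool) : Decidable (Spec_eu_dst year month day hour out) := by unfold Spec_eu_dst; infer_instance

-- ===== CLAIM (what is proved, stated in full; the proofs are below) =====
def Claim_equal_eu_dst : Prop := ∀ (year : Int) (month : Int) (day : Int) (hour : Int), Dom_eu_dst year month day hour → Spec_eu_dst year month day hour (eu_dst year month day hour)

-- ===== LEMMAS AND PROOFS =====

lemma pvMod7 (a : Int) : PySem.Int.mod a 7 = a % 7 :=
  PySem.Int.mod_eq_emod_of_pos (by norm_num)

-- The bounded descending search for the last Sunday equals the closed form.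
lemma pvFind_closed (n : Int) :
    (match ([31, 30, 29, 28, 27, 26, 25] : List Int).find?
        (fun d => ((n + d) % 7 : Int) == 0) with
     | some d => d
     | none => 31) = 31 - (n + 31) % 7 := by
  obtain ⟨q, r, hr0, hr7, hn⟩ : ∃ q r : Int, 0 ≤ r ∧ r < 7 ∧ n = 7 * q + r :=
    ⟨n / 7, n % 7, Int.emod_nonneg n (by norm_num), Int.emod_lt_of_pos n (by norm_num),
      by omega⟩
  subst hn
  have h25 : (7 * q + r + 25) % 7 = (r + 4) % 7 := by omega
  have h26 : (7 * q + r + 26) % 7 = (r + 5) % 7 := by omega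
  have h27 : (7 * q + r + 27) % 7 = (r + 6) % 7 := by omega
  have h28 : (7 * q + r + 28) % 7 = r % 7 := by omega
  have h29 : (7 * q + r + 29) % 7 = (r + 1) % 7 := by omega
  have h30 : (7 * q + r + 30) % 7 = (r + 2) % 7 := by omega
  have h31 : (7 * q + r + 31) % 7 = (r + 3) % 7 := by omega
  simp only [List.find?, h25, h26, h27, h28, h29, h30, h31]
  interval_cases r <;> decide

-- A's weekday helper evaluated at the two boundary months.
lemma pvWeekdayA_3 (y d : Int) :
    pvWeekdayA y 3 d = (y + PySem.Int.floordiv y 4 - PySem.Int.floordiv y 100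
      + PySem.Int.floordiv y 400 + 2 + d) % 7 := by
  unfold pvWeekdayA
  simp only [show ((3 : Int) < 3) = False by simp, if_false, pvMod7]
  norm_num [PySem.List.pyGetD]
  rfl

lemma pvWeekdayA_10 (y d : Int) :
    pvWeekdayA y 10 d = (y + PySem.Int.floordiv y 4 - PySem.Int.floordiv y 100
      + PySem.Int.floordiv y 400 + 6 + d) % 7 := by
  unfold pvWeekdayA
  simp only [show ((10 : Int) < 3) = False by simp, if_false, pvMod7]
  norm_num [PySem.List.pyGetD]
  rfl

-- A's searched last Sundays of March and October in terms of B's year term.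
lemma pvLastSundayA_march (y : Int) :
    pvLastSundayA y 3 =
      31 - ((y + PySem.Int.floordiv y 4 - PySem.Int.floordiv y 100
        + PySem.Int.floordiv y 400) % 7 + 33) % 7 := by
  unfold pvLastSundayA
  rw [show PySem.List.pyRange 31 24 (-1) = [31, 30, 29, 28, 27, 26, 25] from by decide]
  simp only [pvWeekdayA_3]
  rw [pvFind_closed (y + PySem.Int.floordiv y 4 - PySem.Int.floordiv y 100
    + PySem.Int.floordiv y 400 + 2)]
  omega

lemma pvLastSundayA_oct (y : Int) :
    pvLastSundayA y 10 =
      31 - ((y + PySem.Int.floordiv y 4 - PySem.Int.floordiv y 100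
        + PySem.Int.floordiv y 400) % 7 + 37) % 7 := by
  unfold pvLastSundayA
  rw [show PySem.List.pyRange 31 24 (-1) = [31, 30, 29, 28, 27, 26, 25] from by decide]
  simp only [pvWeekdayA_10]
  rw [pvFind_closed (y + PySem.Int.floordiv y 4 - PySem.Int.floordiv y 100
    + PySem.Int.floordiv y 400 + 6)]
  omega

-- ===== VERDICT (by name: the statement is the Claim_ definition above) =====
theorem eu_dst_spec : Claim_equal_eu_dst := by
  intro year month day hour _
  unfold Spec_eu_dst eu_dst eu_dst_alt
  simp only [pvMod7]
  rw [pvLastSundayA_march, pvLastSundayA_oct]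
  set S := year + PySem.Int.floordiv year 4 - PySem.Int.floordiv year 100
    + PySem.Int.floordiv year 400 with hS
  set L3 := 31 - (S % 7 + 33) % 7 with hL3
  set L10 := 31 - (S % 7 + 37) % 7 with hL10
  by_cases h3 : month = 3
  · subst h3
    simp only [Bool.false_and, beq_self_eq_true, Bool.true_and,
      show (decide ((3 : Int) < 3)) = false by decide, Bool.false_or]
    rcases lt_trichotomy day L3 with h | h | h
    · simp [show ¬ day > L3 by omega, show (day == L3) = false by simp; omega,
        show (L3 == day) = false by simp; omega]
    · subst h
      simp
    · simp [show day > L3 by omega]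
  · by_cases h10 : month = 10
    · subst h10
      simp only [Bool.false_and, show ((10 : Int) == 3) = false by decide,
        beq_self_eq_true, Bool.true_and,
        show (decide ((3 : Int) < 10)) = true by decide, Bool.true_or, Bool.true_and]
      rcases lt_trichotomy day L10 with h | h | h
      · simp [show day < L10 by omega]
      · subst h
        simp
      · simp [show ¬ day < L10 by omega, show (day == L10) = false by simp; omega]
    · by_cases hlo : month < 3
      · simp only [show (month < 3 || month > 10) = true by simp [hlo], if_true]
        have h1 : ¬ (3 : Int) < month := by omega
        simp [h1, h3]
      · by_cases hhi : month > 10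
        · simp only [show (month < 3 || month > 10) = true by simp [hhi], if_true]
          have h1 : ¬ month < 10 := by omega
          simp [h1, h10]
        · have hmid : 3 < month ∧ month < 10 := by omega
          simp only [show (month < 3 || month > 10) = false by simp; omega,
            show (decide (3 < month) && decide (month < 10)) = true by simp; omega, if_true,
            Bool.false_eq_true, if_false]
          simp [hmid.1, hmid.2]
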